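-- pv_equiv track=rewrite | github.com/29379/Relational-Db-To-NoSQL-Converter | xd.py | build_resolution
-- ===== SOURCE A (Python) =====
-- def get_starting_ids(foreign_key_mapping, current_table):
--     starting_ids = set()
--     for key, value in foreign_key_mapping.items():
--         if current_table in value:
--             for pair in value[current_table]:
--                 starting_ids.add(pair[1])
--     return list(starting_ids)
--
-- def find_chain(foreign_key_mapping, current_table, merged_table_name):
--     chain = [current_table]
--     while True:
--         found = False
--         for key, value in foreign_key_mapping.items():
--             if current_table in value:
--                 chain.append(key)
--                 current_table = key
--                 found = True
--                 break
--         if not found or current_table == merged_table_name.split('__')[0]: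
--             break
--     # chain.reverse()
--     return chain
--
-- def build_resolution(foreign_key_mapping, postgres_data, current_table, merged_table_name):
--     chain = find_chain(foreign_key_mapping, current_table, merged_table_name)
--     starting_ids = get_starting_ids(foreign_key_mapping, current_table)
--
--     resolved_ids = {}
--     for start_id in starting_ids:
--         current_id = start_id
--
--         for i in range(1, len(chain)):
--             table = chain[i]
--             previous_table = chain[i - 1]
--             next_id = None
--
--             for fk_pair in foreign_key_mapping[table].get(previous_table, []):
--                 if fk_pair[1] == current_id:
--                     next_id = fk_pair[0]
--                     break
--
--             if next_id is not None:
--                 current_id = next_id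
--             else:
--                 break
--
--         resolved_ids[start_id] = current_id
--
--     return resolved_ids
-- ===== SOURCE B (Python) =====
-- def get_starting_ids(foreign_key_mapping, current_table):
--     starting_ids = set()
--     for key, value in foreign_key_mapping.items():
--         if current_table in value:
--             for pair in value[current_table]:
--                 starting_ids.add(pair[1])
--     return list(starting_ids)
--
-- def find_chain(foreign_key_mapping, current_table, merged_table_name):
--     chain = [current_table]
--     while True:
--         found = False
--         for key, value in foreign_key_mapping.items():
--             if current_table in value:
--                 chain.append(key)
--                 current_table = key
--                 found = True
--                 break
--         if not found or current_table == merged_table_name.split('__')[0]: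
--             break
--     return chain
--
-- def build_resolution(foreign_key_mapping, postgres_data, current_table, merged_table_name):
--     # Hop-at-a-time resolution: one pass over the chain, advancing ALL start ids per hop
--     # through a first-match index of that hop's fk pairs, instead of an independent walk per start.
--     chain = find_chain(foreign_key_mapping, current_table, merged_table_name)
--     starting_ids = get_starting_ids(foreign_key_mapping, current_table)
--
--     resolved = {s: s for s in starting_ids}
--     active = set(starting_ids)
--     for i in range(1, len(chain)):
--         fk_pairs = foreign_key_mapping[chain[i]].get(chain[i - 1], [])
--         step = {}
--         for a, b in fk_pairs:
--             if b not in step: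
--                 step[b] = a
--         new_resolved = {}
--         new_active = set()
--         for s, cur in resolved.items():
--             if s in active and cur in step:
--                 new_resolved[s] = step[cur]
--                 new_active.add(s)
--             else:
--                 new_resolved[s] = cur
--         resolved, active = new_resolved, new_active
--     return resolved
-- ===== Notes on version B (the rewrite author's own statement) =====
-- stated objective: alternative
-- what changed: Instead of an independent chain walk per start id with an inner linear scan over the fk pairs at every hop, B walks the chain once, advancing all start ids hop by hop through a first-match index (dict) of that hop's fk pairs and an active set for ids whose walk has not broken off.
import Mathlib
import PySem

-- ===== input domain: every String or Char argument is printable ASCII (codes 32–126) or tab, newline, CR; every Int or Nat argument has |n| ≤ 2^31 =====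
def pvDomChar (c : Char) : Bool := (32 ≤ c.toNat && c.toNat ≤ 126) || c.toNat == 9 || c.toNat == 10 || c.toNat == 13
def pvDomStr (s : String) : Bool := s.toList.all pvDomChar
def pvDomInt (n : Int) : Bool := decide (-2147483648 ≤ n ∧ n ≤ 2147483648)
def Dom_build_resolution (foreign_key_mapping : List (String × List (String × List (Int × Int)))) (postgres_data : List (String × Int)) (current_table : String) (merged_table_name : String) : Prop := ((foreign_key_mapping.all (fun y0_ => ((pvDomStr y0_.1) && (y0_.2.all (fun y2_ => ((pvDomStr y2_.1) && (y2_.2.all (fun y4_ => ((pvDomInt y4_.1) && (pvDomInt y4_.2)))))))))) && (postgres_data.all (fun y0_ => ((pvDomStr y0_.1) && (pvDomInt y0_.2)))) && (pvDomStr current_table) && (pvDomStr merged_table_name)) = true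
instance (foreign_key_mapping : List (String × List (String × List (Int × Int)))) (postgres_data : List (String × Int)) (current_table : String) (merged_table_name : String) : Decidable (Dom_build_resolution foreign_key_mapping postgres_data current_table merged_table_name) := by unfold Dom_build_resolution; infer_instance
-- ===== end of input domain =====

-- B resolves the chain one hop at a time for ALL start ids simultaneously, through a
-- first-match index of each hop's fk pairs, instead of A's independent walk per start id
-- (objective: alternative decomposition; return value — a dict, insertion order included — is identical).

-- ===== PORT A =====
-- shared helpers: find_chain and get_starting_ids are textually identical in Source A and Source B.

-- first key of foreign_key_mapping whose value-dict has t as a key (find_chain's inner for-loop with break)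
def pvFkStep (fkm : List (String × List (String × List (Int × Int)))) (t : String) : Option String :=
  (fkm.find? (fun kv => kv.2.any (fun pv => pv.1 == t))).map (·.1)

-- find_chain's while-loop; the fuel (fkm.length + 1) never runs out on inputs where the
-- Python loop terminates (Pre_): the step function is deterministic over at most fkm.length keys.
def pvFindChainAux (fkm : List (String × List (String × List (Int × Int)))) (stopT : String) : Nat → String → List String
  | 0, _ => []
  | n+1, t =>
      match pvFkStep fkm t with
      | none => []
      | some k => if k == stopT then [k] else k :: pvFindChainAux fkm stopT n k

def pvChainOf (fkm : List (String × List (String × List (Int × Int)))) (ct mt : String) : List String :=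
  ct :: pvFindChainAux fkm (((PySem.Str.split? mt "__").getD []).headD "") (fkm.length + 1) ct

def pvGetStartingIds (fkm : List (String × List (String × List (Int × Int)))) (ct : String) : PySem.Set Int :=
  fkm.foldl (fun s kv =>
    if kv.2.any (fun pv => pv.1 == ct) then
      (((kv.2.find? (fun pv => pv.1 == ct)).map (·.2)).getD []).foldl
        (fun s pair => PySem.Set.add s pair.2) s
    else s) PySem.Set.empty

-- foreign_key_mapping[chain[i]].get(chain[i-1], []); chain[i] (i ≥ 1) is always a key produced
-- by pvFkStep, so the outer .getD [] never fires on the indices the loops feed it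
def pvP (fkm : List (String × List (String × List (Int × Int)))) (chain : List String) (i : Int) : List (Int × Int) :=
  let inner := ((fkm.find? (fun kv => kv.1 == PySem.List.pyGetD chain i "")).map (·.2)).getD []
  ((inner.find? (fun pv => pv.1 == PySem.List.pyGetD chain (i-1) "")).map (·.2)).getD []

-- A's inner loop over i in range(1, len(chain)), with its two breaks
def pvWalkA (fkm : List (String × List (String × List (Int × Int)))) (chain : List String) : List Int → Int → Int
  | [], cur => cur
  | i :: rest, cur =>
      match (pvP fkm chain i).find? (fun fk => fk.2 == cur) with
      | some fk => pvWalkA fkm chain rest fk.1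
      | none => cur

def build_resolution (foreign_key_mapping : List (String × List (String × List (Int × Int)))) (postgres_data : List (String × Int)) (current_table : String) (merged_table_name : String) : List (Int × Int) :=
  let chain := pvChainOf foreign_key_mapping current_table merged_table_name
  let starting := pvGetStartingIds foreign_key_mapping current_table
  let idxs := PySem.List.pyRange 1 (chain.length : Int) 1
  (starting.foldl (fun (d : PySem.Dict Int Int) s => d.insert s (pvWalkA foreign_key_mapping chain idxs s))
    PySem.Dict.empty).items

-- ===== PORT B =====
-- step = {}; for a, b in fk_pairs: if b not in step: step[b] = a
def pvStepDict (pairs : List (Int × Int)) : PySem.Dict Int Int :=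
  pairs.foldl (fun d ab => if d.contains ab.2 then d else d.insert ab.2 ab.1) PySem.Dict.empty

-- one hop: rebuild (resolved, active) by one pass over resolved.items()
def pvHopB (stepd : PySem.Dict Int Int) (st : PySem.Dict Int Int × PySem.Set Int) : PySem.Dict Int Int × PySem.Set Int :=
  st.1.items.foldl (fun acc sc =>
    if PySem.Set.contains st.2 sc.1 && stepd.contains sc.2 then
      (acc.1.insert sc.1 (stepd.getD sc.2 0), PySem.Set.add acc.2 sc.1)
    else
      (acc.1.insert sc.1 sc.2, acc.2)) (PySem.Dict.empty, PySem.Set.empty)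

def build_resolution_alt (foreign_key_mapping : List (String × List (String × List (Int × Int)))) (postgres_data : List (String × Int)) (current_table : String) (merged_table_name : String) : List (Int × Int) :=
  let chain := pvChainOf foreign_key_mapping current_table merged_table_name
  let starting := pvGetStartingIds foreign_key_mapping current_table
  let init := (starting.foldl (fun (d : PySem.Dict Int Int) s => d.insert s s) PySem.Dict.empty,
               PySem.Set.ofList starting)
  let fin := (PySem.List.pyRange 1 (chain.length : Int) 1).foldl (fun st i =>
      pvHopB (pvStepDict (pvP foreign_key_mapping chain i)) st) init
  fin.1.items

-- ===== PRECONDITION & SPEC =====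
-- the fk-chain from t terminates within n steps (reaches a table with no outgoing edge, or the merged prefix)
def pvStops (fkm : List (String × List (String × List (Int × Int)))) (stopT : String) : Nat → String → Bool
  | 0, _ => false
  | n+1, t =>
      match pvFkStep fkm t with
      | none => true
      | some k => k == stopT || pvStops fkm stopT n k

-- Pre_ excludes (a) association lists with duplicate keys in the outer or an inner dict, which do not
-- represent any Python dict input, and (b) inputs on which find_chain's while-loop never terminates
-- (a cycle of fk edges reachable from current_table that never hits the merged prefix): there A diverges.
def Pre_build_resolution (foreign_key_mapping : List (String × List (String × List (Int × Int)))) (postgres_data : List (String × Int)) (current_table : String) (merged_table_name : String) : Prop :=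
  (foreign_key_mapping.map Prod.fst).Nodup ∧
  (∀ kv ∈ foreign_key_mapping, (kv.2.map Prod.fst).Nodup) ∧
  pvStops foreign_key_mapping (((PySem.Str.split? merged_table_name "__").getD []).headD "")
    (foreign_key_mapping.length + 1) current_table = true
instance (foreign_key_mapping : List (String × List (String × List (Int × Int)))) (postgres_data : List (String × Int)) (current_table : String) (merged_table_name : String) : Decidable (Pre_build_resolution foreign_key_mapping postgres_data current_table merged_table_name) := by unfold Pre_build_resolution; infer_instance

def pvWitness_build_resolution : (List (String × List (String × List (Int × Int)))) × (List (String × Int)) × String × String :=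
  ([("a", [("b", [(1, 2)])])], [], "b", "a")

def Spec_build_resolution (foreign_key_mapping : List (String × List (String × List (Int × Int)))) (postgres_data : List (String × Int)) (current_table : String) (merged_table_name : String) (out : List (Int × Int)) : Prop := out = build_resolution_alt foreign_key_mapping postgres_data current_table merged_table_name
instance (foreign_key_mapping : List (String × List (String × List (Int × Int)))) (postgres_data : List (String × Int)) (current_table : String) (merged_table_name : String) (out : List (Int × Int)) : Decidable (Spec_build_resolution foreign_key_mapping postgres_data current_table merged_table_name out) := by unfold Spec_build_resolution; infer_instance

-- ===== CLAIM (what is proved, stated in full; the proofs are below) =====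
def Claim_equal_build_resolution : Prop := ∀ (foreign_key_mapping : List (String × List (String × List (Int × Int)))) (postgres_data : List (String × Int)) (current_table : String) (merged_table_name : String), Dom_build_resolution foreign_key_mapping postgres_data current_table merged_table_name → Pre_build_resolution foreign_key_mapping postgres_data current_table merged_table_name → Spec_build_resolution foreign_key_mapping postgres_data current_table merged_table_name (build_resolution foreign_key_mapping postgres_data current_table merged_table_name)

-- ===== LEMMAS AND PROOFS =====

-- per-start state (current id, still-active flag) advanced by one hop whose fk-pair list is `pairs`
def pvStep1 (pairs : List (Int × Int)) : Int × Bool → Int × Bool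
  | (c, act) =>
    if act then
      match pairs.find? (fun fk => fk.2 == c) with
      | some fk => (fk.1, true)
      | none => (c, false)
    else (c, false)

def pvWS (P : Int → List (Int × Int)) : List Int → (Int × Bool) → (Int × Bool)
  | [], p => p
  | i :: rest, p => pvWS P rest (pvStep1 (P i) p)

lemma pvWS_frozen (P : Int → List (Int × Int)) (idxs : List Int) (c : Int) :
    pvWS P idxs (c, false) = (c, false) := by
  induction idxs with
  | nil => rfl
  | cons i rest ih => simpa [pvWS, pvStep1] using ih

lemma pvWalkA_eq_pvWS (fkm : List (String × List (String × List (Int × Int)))) (chain : List String)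
    (idxs : List Int) (cur : Int) :
    pvWalkA fkm chain idxs cur = (pvWS (pvP fkm chain) idxs (cur, true)).1 := by
  induction idxs generalizing cur with
  | nil => rfl
  | cons i rest ih =>
      simp only [pvWalkA, pvWS, pvStep1]
      cases h : (pvP fkm chain i).find? (fun fk => fk.2 == cur) with
      | none => simp [pvWS_frozen]
      | some fk => simp [ih]

lemma pvStepDict_fold_get? (pairs : List (Int × Int)) (d : PySem.Dict Int Int) (c : Int) :
    (pairs.foldl (fun d ab => if d.contains ab.2 then d else d.insert ab.2 ab.1) d).get? c
      = (d.get? c).or ((pairs.find? (fun ab => ab.2 == c)).map (·.1)) := by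
  induction pairs generalizing d with
  | nil => simp
  | cons ab rest ih =>
      simp only [List.foldl_cons, List.find?]
      by_cases hbc : ab.2 = c
      · subst hbc
        by_cases hcont : d.contains ab.2
        · rw [if_pos hcont, ih]
          rcases h : d.get? ab.2 with _ | v
          · rw [PySem.Dict.contains_eq_isSome_get?, h] at hcont; simp at hcont
          · simp
        · rw [if_neg hcont, ih]
          have hnone : d.get? ab.2 = none := by
            rcases h : d.get? ab.2 with _ | v
            · rfl
            · rw [PySem.Dict.contains_eq_isSome_get?, h] at hcont; simp at hcont
          simp [PySem.Dict.get?_insert_self, hnone]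
      · have hb : (ab.2 == c) = false := by simp [hbc]
        by_cases hcont : d.contains ab.2
        · rw [if_pos hcont, ih]; simp [hb]
        · rw [if_neg hcont, ih, PySem.Dict.get?_insert_of_ne d ab.1 (Ne.symm hbc)]; simp [hb]

lemma pvStepDict_get? (pairs : List (Int × Int)) (c : Int) :
    (pvStepDict pairs).get? c = (pairs.find? (fun ab => ab.2 == c)).map (·.1) := by
  simp [pvStepDict, pvStepDict_fold_get?]

lemma pvStepDict_contains (pairs : List (Int × Int)) (c : Int) :
    (pvStepDict pairs).contains c = (pairs.find? (fun ab => ab.2 == c)).isSome := by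
  rw [PySem.Dict.contains_eq_isSome_get?, pvStepDict_get?, Option.isSome_map]

-- pvHopB's fold, over fresh distinct keys, appends its pointwise results
lemma pvHop_fold (cond : Int × Int → Bool) (val : Int × Int → Int) :
    ∀ (l : List (Int × Int)) (d : PySem.Dict Int Int) (s : PySem.Set Int),
      (∀ p ∈ l, d.contains p.1 = false) → (∀ p ∈ l, p.1 ∉ s) → (l.map Prod.fst).Nodup →
      l.foldl (fun acc sc =>
          if cond sc then (acc.1.insert sc.1 (val sc), PySem.Set.add acc.2 sc.1)
          else (acc.1.insert sc.1 sc.2, acc.2)) (d, s)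
        = (⟨d.items ++ l.map (fun sc => (sc.1, if cond sc then val sc else sc.2))⟩,
           s ++ (l.filter cond).map Prod.fst) := by
  intro l
  induction l with
  | nil =>
      intro d s _ _ _
      simp only [List.foldl_nil, List.map_nil, List.filter_nil, List.append_nil]
  | cons p rest ih =>
      intro d s hd hs hnd
      simp only [List.map_cons, List.nodup_cons] at hnd
      have hdp : d.contains p.1 = false := hd p (by simp)
      have hins : ∀ v : Int, d.insert p.1 v = (⟨d.items ++ [(p.1, v)]⟩ : PySem.Dict Int Int) :=
        fun v => PySem.Dict.ext (PySem.Dict.items_insert_of_not_contains d v hdp)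
      have hrestd : ∀ v : Int, ∀ q ∈ rest,
          ((⟨d.items ++ [(p.1, v)]⟩ : PySem.Dict Int Int)).contains q.1 = false := by
        intro v q hq
        rw [← hins v, PySem.Dict.contains_insert]
        have h1 : (q.1 == p.1) = false := by
          simp only [beq_eq_false_iff_ne, ne_eq]
          intro h; exact hnd.1 (h ▸ List.mem_map_of_mem hq)
        rw [h1, hd q (by simp [hq]), Bool.or_self]
      by_cases hc : cond p = true
      · have hadd : PySem.Set.add s p.1 = s ++ [p.1] :=
          PySem.Set.add_of_not_mem (hs p (by simp))
        have hrests : ∀ q ∈ rest, q.1 ∉ s ++ [p.1] := by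
          intro q hq
          simp only [List.mem_append, List.mem_singleton]
          rintro (h | h)
          · exact hs q (by simp [hq]) h
          · exact hnd.1 (h ▸ List.mem_map_of_mem hq)
        rw [List.foldl_cons]
        simp only [hins, hadd]
        rw [if_pos hc]
        rw [ih _ _ (hrestd _) hrests hnd.2]
        simp [hc, List.append_assoc]
      · have hrests : ∀ q ∈ rest, q.1 ∉ s := fun q hq => hs q (by simp [hq])
        rw [List.foldl_cons]
        simp only [hins]
        rw [if_neg hc, ih _ _ (hrestd _) hrests hnd.2]
        simp [hc, List.append_assoc]

lemma pvContains_filter {s : Int} {starting : List Int} (p : Int → Bool) (hs : s ∈ starting) :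
    PySem.Set.contains (starting.filter p) s = p s := by
  by_cases h : p s = true
  · rw [h]
    exact (PySem.Set.contains_iff _ _).mpr (List.mem_filter.mpr ⟨hs, h⟩)
  · rw [Bool.eq_false_iff.mpr h, ← Bool.not_eq_true]
    intro hc
    exact h (List.mem_filter.mp ((PySem.Set.contains_iff _ _).mp hc)).2

-- one hop of B advances every start id by pvStep1 and refilters the active set
lemma pvHopB_step (pairs : List (Int × Int)) (starting : List Int) (f : Int → Int × Bool)
    (hnd : starting.Nodup) :
    pvHopB (pvStepDict pairs)
      (⟨starting.map (fun s => (s, (f s).1))⟩, starting.filter (fun s => (f s).2))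
    = (⟨starting.map (fun s => (s, (pvStep1 pairs (f s)).1))⟩,
       starting.filter (fun s => (pvStep1 pairs (f s)).2)) := by
  unfold pvHopB
  rw [pvHop_fold (cond := fun sc => PySem.Set.contains (starting.filter (fun s => (f s).2)) sc.1
        && (pvStepDict pairs).contains sc.2) (val := fun sc => (pvStepDict pairs).getD sc.2 0)
      (l := starting.map (fun s => (s, (f s).1))) (d := PySem.Dict.empty) (s := PySem.Set.empty)
      (by intro q _; simp [PySem.Dict.contains_empty])
      (by intro q _; simp [PySem.Set.empty])
      (by simpa [List.map_map, Function.comp_def] using hnd)]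
  refine Prod.ext (PySem.Dict.ext ?_) ?_
  · show PySem.Dict.empty.items ++ _ = _
    have hemp : (PySem.Dict.empty : PySem.Dict Int Int).items = [] := rfl
    rw [hemp, List.nil_append, List.map_map]
    refine List.map_congr_left ?_
    intro s hsm
    simp only [Function.comp]
    rw [pvContains_filter _ hsm, pvStepDict_contains]
    rcases hfs : f s with ⟨c, act⟩
    cases act with
    | false => simp [pvStep1]
    | true =>
        cases hfind : pairs.find? (fun fk => fk.2 == c) with
        | none => simp [pvStep1, hfind]
        | some fk => simp [pvStep1, hfind, PySem.Dict.getD_eq_get?_getD, pvStepDict_get?]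
  · show PySem.Set.empty ++ _ = _
    have hemp : (PySem.Set.empty : PySem.Set Int) = ([] : List Int) := rfl
    rw [hemp, List.nil_append, List.filter_map, List.map_map]
    have hid : ∀ xs : List Int, xs.map (Prod.fst ∘ fun s => ((s : Int), (f s).1)) = xs := by
      intro xs; simp [Function.comp_def]
    rw [hid]
    refine List.filter_congr ?_
    intro s hsm
    simp only [Function.comp]
    rw [pvContains_filter _ hsm, pvStepDict_contains]
    rcases hfs : f s with ⟨c, act⟩
    cases act with
    | false => simp [pvStep1]
    | true =>
        cases hfind : pairs.find? (fun fk => fk.2 == c) with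
        | none => simp [pvStep1, hfind]
        | some fk => simp [pvStep1, hfind]

-- the whole B loop, by induction over the hop indices
lemma pvB_loop (P : Int → List (Int × Int)) (idxs : List Int) :
    ∀ (starting : List Int) (f : Int → Int × Bool), starting.Nodup →
    idxs.foldl (fun st i => pvHopB (pvStepDict (P i)) st)
      (⟨starting.map (fun s => (s, (f s).1))⟩, starting.filter (fun s => (f s).2))
    = (⟨starting.map (fun s => (s, (pvWS P idxs (f s)).1))⟩,
       starting.filter (fun s => (pvWS P idxs (f s)).2)) := by
  induction idxs with
  | nil => intro starting f _; rfl
  | cons i rest ih =>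
      intro starting f hnd
      rw [List.foldl_cons, pvHopB_step (P i) starting f hnd,
        ih starting (fun s => pvStep1 (P i) (f s)) hnd]
      rfl

lemma pvNodup_fold_add (l : List (Int × Int)) (s : PySem.Set Int) (h : s.Nodup) :
    (l.foldl (fun s pair => PySem.Set.add s pair.2) s).Nodup := by
  induction l generalizing s with
  | nil => exact h
  | cons p rest ih => exact ih _ (PySem.Set.nodup_add _ _ h)

lemma pvNodup_startingIds (fkm : List (String × List (String × List (Int × Int)))) (ct : String) :
    (pvGetStartingIds fkm ct).Nodup := by
  unfold pvGetStartingIds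
  generalize hinit : PySem.Set.empty = s0
  have h0 : (s0 : PySem.Set Int).Nodup := by rw [← hinit]; simp [PySem.Set.empty]
  clear hinit
  induction fkm generalizing s0 with
  | nil => exact h0
  | cons kv rest ih =>
      rw [List.foldl_cons]
      split
      · exact ih _ (pvNodup_fold_add _ _ h0)
      · exact ih _ h0

lemma pvA_items (starting : List Int) (w : Int → Int) (hnd : starting.Nodup) :
    (starting.foldl (fun (d : PySem.Dict Int Int) s => d.insert s (w s)) PySem.Dict.empty).items
      = starting.map (fun s => (s, w s)) := by
  have h := PySem.Dict.items_foldl_insert_fresh starting (fun s => s) w PySem.Dict.empty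
    (by intro a _; simp [PySem.Dict.contains_empty]) (by simpa using hnd)
  simpa using h

-- ===== VERDICT (by name: the statement is the Claim_ definition above) =====
theorem build_resolution_spec : Claim_equal_build_resolution := by
  intro fkm pg ct mt _ _
  show build_resolution fkm pg ct mt = build_resolution_alt fkm pg ct mt
  have hnd : (pvGetStartingIds fkm ct).Nodup := pvNodup_startingIds fkm ct
  simp only [build_resolution, build_resolution_alt]
  rw [pvA_items _ _ hnd]
  have hinit : ((pvGetStartingIds fkm ct).foldl
        (fun (d : PySem.Dict Int Int) s => d.insert s s) PySem.Dict.empty,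
        PySem.Set.ofList (pvGetStartingIds fkm ct))
      = ((⟨(pvGetStartingIds fkm ct).map (fun s => (s, ((fun s => ((s : Int), true)) s).1))⟩ :
            PySem.Dict Int Int),
         (pvGetStartingIds fkm ct).filter (fun s => ((fun s => ((s : Int), true)) s).2)) := by
    refine Prod.ext (PySem.Dict.ext ?_) ?_
    · simpa using pvA_items (pvGetStartingIds fkm ct) (fun s => s) hnd
    · simp [PySem.Set.ofList_eq_self_of_nodup _ hnd]
  rw [hinit, pvB_loop]
  · simp [pvWalkA_eq_pvWS]
  · exact hnd
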